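-- pv_equiv track=rewrite | github.com/shinkeonkim/BOJ | 25000~25999/25100~25199/25166.py | solution
-- ===== SOURCE A (Python) =====
-- def solution(s, m):
--   if s < 1024:
--     return 'No thanks'
--
--   d = s - 1023
--   k = 512
--
--   while k > 0:
--     if m >= k:
--       m -= k
--       if d >= k:
--         d -= k
--
--     k //= 2
--
--   if d > 0:
--     return 'Impossible'
--
--   return 'Thanks'
-- ===== SOURCE B (Python) =====
-- def solution(s, m):
--     if s < 1024:
--         return 'No thanks'
--     d = s - 1023
--     mask = max(0, min(m, 1023))
--     return 'Thanks' if d & mask == d else 'Impossible'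
-- ===== Notes on version B (the rewrite author's own statement) =====
-- stated objective: simpler
-- what changed: A's descending power-of-two greedy subtraction loop over k=512..1 is replaced by clamping m to [0,1023] and one bitwise submask test (d & mask == d).
import Mathlib
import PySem

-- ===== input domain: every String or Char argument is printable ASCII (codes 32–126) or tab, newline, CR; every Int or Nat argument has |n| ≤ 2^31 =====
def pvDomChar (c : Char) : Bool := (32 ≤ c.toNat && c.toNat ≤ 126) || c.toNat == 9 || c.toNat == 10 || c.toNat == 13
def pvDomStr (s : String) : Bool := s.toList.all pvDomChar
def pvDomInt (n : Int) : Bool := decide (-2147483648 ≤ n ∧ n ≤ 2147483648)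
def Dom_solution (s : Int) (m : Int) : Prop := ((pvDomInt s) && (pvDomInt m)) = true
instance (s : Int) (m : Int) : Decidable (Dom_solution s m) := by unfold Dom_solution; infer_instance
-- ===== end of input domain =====

-- B replaces A's descending power-of-two greedy loop by a single bitwise submask
-- test against the clamped budget (simpler; same constant cost).

-- ===== PORT A =====
-- A's while-loop: k runs 512, 256, …, 1; ported as recursion on the exponent
-- (k = 2^n at each step, k //= 2 = exponent decrement); returns the final d.
def solutionLoop : Nat → Int → Int → Int
  | 0, _, d => d
  | n+1, m, d =>
    let k : Int := 2 ^ n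
    if k ≤ m then
      if k ≤ d then solutionLoop n (m - k) (d - k)
      else solutionLoop n (m - k) d
    else solutionLoop n m d

def solution (s : Int) (m : Int) : String :=
  if s < 1024 then "No thanks"
  else
    let d := solutionLoop 10 m (s - 1023)
    if 0 < d then "Impossible" else "Thanks"

-- ===== PORT B =====
def solution_alt (s : Int) (m : Int) : String :=
  if s < 1024 then "No thanks"
  else
    let d := s - 1023
    let mask := max 0 (min m 1023)
    -- Python's 'd & mask' on ints is PySem.Int.band (exact, including negatives)
    if PySem.Int.band d mask = d then "Thanks" else "Impossible"

-- ===== PRECONDITION & SPEC =====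
def Spec_solution (s : Int) (m : Int) (out : String) : Prop := out = solution_alt s m
instance (s : Int) (m : Int) (out : String) : Decidable (Spec_solution s m out) := by unfold Spec_solution; infer_instance

-- ===== CLAIM (what is proved, stated in full; the proofs are below) =====
def Claim_equal_solution : Prop := ∀ (s : Int) (m : Int), Dom_solution s m → Spec_solution s m (solution s m)

-- ===== LEMMAS AND PROOFS =====

lemma loop_nonneg : ∀ (n : Nat) (m d : Int), 0 ≤ d → 0 ≤ solutionLoop n m d := by
  intro n
  induction n with
  | zero => intro m d hd; simpa [solutionLoop] using hd
  | succ n ih =>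
    intro m d hd
    simp only [solutionLoop]
    split_ifs with h1 h2
    · exact ih _ _ (by omega)
    · exact ih _ _ hd
    · exact ih _ _ hd

-- bit lemma: adding a 2^n bit to the right operand is invisible below 2^n
lemma and_two_pow_add {n x : Nat} (y : Nat) (hx : x < 2 ^ n) :
    x &&& (2 ^ n + y) = x &&& y := by
  apply Nat.eq_of_testBit_eq
  intro i
  simp only [Nat.testBit_land]
  rcases lt_trichotomy i n with h | h | h
  · rw [Nat.testBit_two_pow_add_gt h]
  · subst h
    have : x.testBit i = false := Nat.testBit_lt_two_pow hx
    simp [this]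
  · have : x.testBit i = false :=
      Nat.testBit_lt_two_pow (lt_of_lt_of_le hx (Nat.pow_le_pow_right (by norm_num) h.le))
    simp [this]

-- bit lemma: a common 2^n bit factors out of the and
lemma two_pow_add_and {n x y : Nat} (hx : x < 2 ^ n) (hy : y < 2 ^ n) :
    (2 ^ n + x) &&& (2 ^ n + y) = 2 ^ n + (x &&& y) := by
  apply Nat.eq_of_testBit_eq
  intro i
  simp only [Nat.testBit_land]
  rcases lt_trichotomy i n with h | h | h
  · rw [Nat.testBit_two_pow_add_gt h, Nat.testBit_two_pow_add_gt h,
      Nat.testBit_two_pow_add_gt h, Nat.testBit_land]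
  · subst h
    have hxy : x &&& y < 2 ^ i := lt_of_le_of_lt Nat.and_le_left hx
    simp [Nat.testBit_two_pow_add_eq, Nat.testBit_lt_two_pow hx,
      Nat.testBit_lt_two_pow hy, Nat.testBit_lt_two_pow hxy]
  · have h2 : (2:Nat) ^ (n+1) ≤ 2 ^ i := Nat.pow_le_pow_right (by norm_num) h
    have hp : (2:Nat) ^ (n+1) = 2 * 2 ^ n := by ring
    have hxy : x &&& y < 2 ^ n := lt_of_le_of_lt Nat.and_le_left hx
    rw [Nat.testBit_lt_two_pow (by omega), Nat.testBit_lt_two_pow (by omega),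
      Nat.testBit_lt_two_pow (by omega)]
    simp

-- the heart: A's greedy loop ends at 0 exactly when d is a submask of the clamped budget
lemma loop_zero_iff : ∀ (n : Nat) (m d : Int), 0 ≤ d →
    (solutionLoop n m d = 0 ↔
      d.toNat &&& (max 0 (min m ((2:Int) ^ n - 1))).toNat = d.toNat) := by
  intro n
  induction n with
  | zero =>
    intro m d hd
    simp [solutionLoop]
    omega
  | succ n ih =>
    intro m d hd
    have ha : (0:Int) < 2 ^ n := by positivity
    have haN : (1:Nat) ≤ 2 ^ n := Nat.one_le_two_pow
    have hp : (2:Int) ^ (n+1) = 2 * 2 ^ n := by ring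
    have hcast : ((2:Int) ^ n).toNat = 2 ^ n := by
      rw [show ((2:Int) ^ n) = ((2 ^ n : Nat) : Int) by push_cast; ring, Int.toNat_natCast]
    simp only [solutionLoop]
    split_ifs with h1 h2
    · -- m ≥ 2^n, d ≥ 2^n : both shrink by 2^n
      rw [ih (m - 2 ^ n) (d - 2 ^ n) (by omega)]
      have hCB : max 0 (min m ((2:Int) ^ (n+1) - 1))
          = 2 ^ n + max 0 (min (m - 2 ^ n) ((2:Int) ^ n - 1)) := by omega
      have hC'nn : (0:Int) ≤ max 0 (min (m - 2 ^ n) ((2:Int) ^ n - 1)) := le_max_left _ _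
      have hC'lt : (max 0 (min (m - 2 ^ n) ((2:Int) ^ n - 1))).toNat < 2 ^ n := by omega
      have hCBn : (max 0 (min m ((2:Int) ^ (n+1) - 1))).toNat
          = 2 ^ n + (max 0 (min (m - 2 ^ n) ((2:Int) ^ n - 1))).toNat := by
        rw [hCB]; omega
      rw [hCBn]
      by_cases hD : d < 2 ^ (n+1)
      · -- the 2^n bit of d is set on both sides; factor it out
        have hDlo : d.toNat - 2 ^ n < 2 ^ n := by omega
        have hDsplit : d.toNat = 2 ^ n + (d.toNat - 2 ^ n) := by omega
        have hdt : (d - 2 ^ n).toNat = d.toNat - 2 ^ n := by omega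
        rw [hdt]
        conv_rhs => rw [hDsplit]
        rw [two_pow_add_and hDlo hC'lt]
        constructor
        · intro h; omega
        · intro h; omega
      · -- d ≥ 2^(n+1): both equations are false (d exceeds either mask)
        have hle1 : (d - 2 ^ n).toNat &&& (max 0 (min (m - 2 ^ n) ((2:Int) ^ n - 1))).toNat
            ≤ (max 0 (min (m - 2 ^ n) ((2:Int) ^ n - 1))).toNat := Nat.and_le_right
        have hle2 : d.toNat &&& (2 ^ n + (max 0 (min (m - 2 ^ n) ((2:Int) ^ n - 1))).toNat)
            ≤ 2 ^ n + (max 0 (min (m - 2 ^ n) ((2:Int) ^ n - 1))).toNat := Nat.and_le_right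
        constructor
        · intro h; omega
        · intro h; omega
    · -- m ≥ 2^n, d < 2^n : d passes through; the 2^n bit of the mask is invisible
      rw [ih (m - 2 ^ n) d hd]
      have hCB : max 0 (min m ((2:Int) ^ (n+1) - 1))
          = 2 ^ n + max 0 (min (m - 2 ^ n) ((2:Int) ^ n - 1)) := by omega
      have hC'nn : (0:Int) ≤ max 0 (min (m - 2 ^ n) ((2:Int) ^ n - 1)) := le_max_left _ _
      have hCBn : (max 0 (min m ((2:Int) ^ (n+1) - 1))).toNat
          = 2 ^ n + (max 0 (min (m - 2 ^ n) ((2:Int) ^ n - 1))).toNat := by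
        rw [hCB]; omega
      have hDlt : d.toNat < 2 ^ n := by omega
      rw [hCBn, and_two_pow_add _ hDlt]
    · -- m < 2^n : the clamp is the same at both levels
      rw [ih m d hd]
      have : max 0 (min m ((2:Int) ^ (n+1) - 1)) = max 0 (min m ((2:Int) ^ n - 1)) := by omega
      rw [this]

-- ===== VERDICT (by name: the statement is the Claim_ definition above) =====
theorem solution_spec : Claim_equal_solution := by
  intro s m _
  unfold Spec_solution solution solution_alt
  by_cases hs : s < 1024
  · simp [hs]
  · simp only [hs, if_false]
    have hd : (0:Int) ≤ s - 1023 := by omega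
    have hmask : (0:Int) ≤ max 0 (min m 1023) := le_max_left _ _
    have hband : PySem.Int.band (s - 1023) (max 0 (min m 1023))
        = ((s - 1023).toNat &&& (max 0 (min m 1023)).toNat : Nat) :=
      PySem.Int.band_of_nonneg hd hmask
    have hiff := loop_zero_iff 10 m (s - 1023) hd
    have h1023 : ((2:Int) ^ 10 - 1) = 1023 := by norm_num
    rw [h1023] at hiff
    have hnn := loop_nonneg 10 m (s - 1023) hd
    by_cases hz : solutionLoop 10 m (s - 1023) = 0
    · have hsub := hiff.mp hz
      rw [if_neg (by omega), if_pos (by rw [hband]; omega)]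
    · have hsub : ¬ (s - 1023).toNat &&& (max 0 (min m 1023)).toNat = (s - 1023).toNat :=
        fun h => hz (hiff.mpr h)
      rw [if_pos (by omega), if_neg (by rw [hband]; omega)]
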